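-- pv_equiv track=rewrite | github.com/amitbsen/ny-dagster | scripts/export_venues_json.py | pick_primary
-- ===== SOURCE A (Python) =====
-- FIT_TIER_RANK = {
--     "tier_1_high_fit": 1,
--     "tier_2_strong_potential": 2,
--     "tier_3_worth_exploring": 3,
-- }
--
-- def pick_primary(businesses: list[dict]) -> tuple[str | None, str | None]:
--     """Pick the best subcategory and fit_category from a list of businesses.
--
--     Returns (primarySubcategory, bestFitCategory).
--     Picks highest tier first, then most common subcategory within that tier.
--     """
--     if not businesses:
--         return None, None
--
--     best_tier = min(
--         (FIT_TIER_RANK.get(b["fit_category"], 99) for b in businesses),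
--     )
--     best_fit = next(
--         (k for k, v in FIT_TIER_RANK.items() if v == best_tier),
--         None,
--     )
--
--     # Among best-tier businesses, pick most common subcategory
--     tier_businesses = [
--         b for b in businesses if FIT_TIER_RANK.get(b["fit_category"], 99) == best_tier
--     ]
--     subcategory_counts: dict[str, int] = {}
--     for b in tier_businesses:
--         sc = b.get("subcategory")
--         if sc:
--             subcategory_counts[sc] = subcategory_counts.get(sc, 0) + 1
--
--     primary_sub = max(subcategory_counts, key=subcategory_counts.get) if subcategory_counts else None
--
--     return primary_sub, best_fit
-- ===== SOURCE B (Python) =====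
-- FIT_TIER_RANK = {
--     "tier_1_high_fit": 1,
--     "tier_2_strong_potential": 2,
--     "tier_3_worth_exploring": 3,
-- }
--
-- RANK_TO_TIER = {v: k for k, v in FIT_TIER_RANK.items()}
--
--
-- def pick_primary(businesses: list[dict]) -> tuple[str | None, str | None]:
--     """One grouping pass: rank -> list of truthy subcategories, then lookups."""
--     if not businesses:
--         return None, None
--
--     table: dict[int, list[str]] = {}
--     for b in businesses:
--         rank = FIT_TIER_RANK.get(b["fit_category"], 99)
--         subs = table.setdefault(rank, [])
--         sc = b.get("subcategory")
--         if sc: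
--             subs.append(sc)
--
--     best_tier = min(table)
--     best_fit = RANK_TO_TIER.get(best_tier)
--
--     counts: dict[str, int] = {}
--     for sc in table[best_tier]:
--         counts[sc] = counts.get(sc, 0) + 1
--     primary_sub = max(counts, key=counts.get) if counts else None
--
--     return primary_sub, best_fit
-- ===== Notes on version B (the rewrite author's own statement) =====
-- stated objective: alternative
-- what changed: Replaces A's min-scan plus filter plus counting rescan with a single grouping pass building rank -> truthy-subcategory lists, followed by lookups (min key, reverse tier table, count the one chosen group).
import Mathlib
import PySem

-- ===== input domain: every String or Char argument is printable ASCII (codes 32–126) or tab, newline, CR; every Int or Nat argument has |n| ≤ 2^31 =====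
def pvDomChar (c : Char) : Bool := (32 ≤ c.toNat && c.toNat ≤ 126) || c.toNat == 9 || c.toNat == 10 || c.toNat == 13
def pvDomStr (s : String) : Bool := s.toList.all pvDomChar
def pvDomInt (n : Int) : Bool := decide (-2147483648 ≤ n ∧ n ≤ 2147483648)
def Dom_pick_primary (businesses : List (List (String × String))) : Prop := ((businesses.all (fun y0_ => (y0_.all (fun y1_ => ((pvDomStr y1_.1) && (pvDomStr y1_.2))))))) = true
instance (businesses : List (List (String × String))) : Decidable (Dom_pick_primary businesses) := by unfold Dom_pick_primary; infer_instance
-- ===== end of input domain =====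

-- B replaces A's min-scan + filter + counting rescan with one grouping pass (rank -> truthy
-- subcategories) followed by lookups; same asymptotic cost, different structure.

-- ===== PORT A =====
def FIT_TIER_RANK : PySem.Dict String Int :=
  ⟨[("tier_1_high_fit", 1), ("tier_2_strong_potential", 2), ("tier_3_worth_exploring", 3)]⟩

-- FIT_TIER_RANK.get(b["fit_category"], 99); Pre_ guarantees the "fit_category" key is present
-- (Python raises KeyError otherwise), so the `.getD ""` fallback is never taken on admitted inputs.
def fitRank (b : List (String × String)) : Int :=
  FIT_TIER_RANK.getD ((PySem.Dict.get? ⟨b⟩ "fit_category").getD "") 99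

-- b.get("subcategory")
def subGet (b : List (String × String)) : Option String :=
  PySem.Dict.get? ⟨b⟩ "subcategory"

def pick_primary (businesses : List (List (String × String))) : Option String × Option String :=
  if businesses = [] then (none, none) else
  let best_tier : Int :=
    match PySem.List.min? (businesses.map fitRank) (fun x => x) with
    | some t => t
    | none => 99   -- unreachable: businesses ≠ []
  let best_fit : Option String :=
    (List.find? (fun kv => kv.2 == best_tier) FIT_TIER_RANK.items).map Prod.fst
  let tier_businesses := businesses.filter (fun b => fitRank b == best_tier)
  let counts : PySem.Dict String Int :=
    tier_businesses.foldl (fun d b =>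
      match subGet b with
      | some sc => if sc ≠ "" then d.insert sc (d.getD sc 0 + 1) else d
      | none => d) PySem.Dict.empty
  let primary : Option String :=
    if counts.items.isEmpty then none
    else PySem.List.max? counts.keys (fun k => counts.getD k 0)
  (primary, best_fit)

-- ===== PORT B =====
def RANK_TO_TIER : PySem.Dict Int String :=
  ⟨[(1, "tier_1_high_fit"), (2, "tier_2_strong_potential"), (3, "tier_3_worth_exploring")]⟩

def pick_primary_alt (businesses : List (List (String × String))) : Option String × Option String :=
  if businesses = [] then (none, none) else
  -- one grouping pass: table.setdefault(rank, []) then conditional append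
  let table : PySem.Dict Int (List String) :=
    businesses.foldl (fun d b =>
      d.modify (fitRank b) [] (fun subs =>
        match subGet b with
        | some sc => if sc ≠ "" then subs ++ [sc] else subs
        | none => subs)) PySem.Dict.empty
  let best_tier : Int :=
    match PySem.List.min? table.keys (fun x => x) with
    | some t => t
    | none => 99   -- unreachable: table is nonempty
  let best_fit : Option String := RANK_TO_TIER.get? best_tier
  let counts : PySem.Dict String Int :=
    (table.getD best_tier []).foldl (fun d sc => d.insert sc (d.getD sc 0 + 1)) PySem.Dict.empty
  let primary : Option String :=
    if counts.items.isEmpty then none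
    else PySem.List.max? counts.keys (fun k => counts.getD k 0)
  (primary, best_fit)

-- ===== PRECONDITION & SPEC =====
-- Pre_ excludes exactly the businesses lacking a "fit_category" key, on which A's b["fit_category"]
-- raises KeyError (B raises the same way).
def Pre_pick_primary (businesses : List (List (String × String))) : Prop :=
  (businesses.all (fun b => b.any (fun kv => kv.1 == "fit_category"))) = true
instance (businesses : List (List (String × String))) : Decidable (Pre_pick_primary businesses) := by unfold Pre_pick_primary; infer_instance

def pvWitness_pick_primary : (List (List (String × String))) :=
  [[("fit_category", "tier_1_high_fit"), ("subcategory", "cafe")],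
   [("fit_category", "tier_2_strong_potential")]]

def Spec_pick_primary (businesses : List (List (String × String))) (out : Option String × Option String) : Prop := out = pick_primary_alt businesses
instance (businesses : List (List (String × String))) (out : Option String × Option String) : Decidable (Spec_pick_primary businesses out) := by unfold Spec_pick_primary; infer_instance

-- ===== CLAIM (what is proved, stated in full; the proofs are below) =====
def Claim_equal_pick_primary : Prop := ∀ (businesses : List (List (String × String))), Dom_pick_primary businesses → Pre_pick_primary businesses → Spec_pick_primary businesses (pick_primary businesses)

-- ===== LEMMAS AND PROOFS =====

-- the 0- or 1-element list of the truthy subcategory of one business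
def truthySub (b : List (String × String)) : List String :=
  match subGet b with
  | some sc => if sc ≠ "" then [sc] else []
  | none => []

-- min over the deduplicated list (= the table's key set) is min over the original list
lemma min_ofList (xs : List Int) (hne : xs ≠ []) :
    PySem.List.min? (PySem.Set.ofList xs) (fun x => x) = PySem.List.min? xs (fun x => x) := by
  cases h2 : PySem.List.min? xs (fun x : Int => x) with
  | none => exact absurd ((PySem.List.min?_eq_none_iff _ _).mp h2) hne
  | some m =>
    cases h1 : PySem.List.min? (PySem.Set.ofList xs) (fun x : Int => x) with
    | none =>
      have := (PySem.List.min?_eq_none_iff (PySem.Set.ofList xs) (fun x : Int => x)).mp h1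
      obtain ⟨x, hx⟩ := List.exists_mem_of_ne_nil xs hne
      have : x ∈ PySem.Set.ofList xs := (PySem.Set.mem_ofList xs x).mpr hx
      simp_all
    | some m' =>
      have hm'x : m' ∈ xs := (PySem.Set.mem_ofList xs m').mp (PySem.List.min?_mem h1)
      have hmx : m ∈ PySem.Set.ofList xs := (PySem.Set.mem_ofList xs m).mpr (PySem.List.min?_mem h2)
      have h1le : m' ≤ m := PySem.List.min?_isMin h1 m hmx
      have h2le : m ≤ m' := PySem.List.min?_isMin h2 m' hm'x
      exact congrArg some (le_antisymm h1le h2le)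

-- the grouped table's entry at r is the truthy subcategories of the rank-r businesses, in order
lemma getD_groupFold (l : List (List (String × String))) (d : PySem.Dict Int (List String)) (r : Int) :
    (l.foldl (fun d b =>
      d.modify (fitRank b) [] (fun subs =>
        match subGet b with
        | some sc => if sc ≠ "" then subs ++ [sc] else subs
        | none => subs)) d).getD r []
    = d.getD r [] ++ (l.filter (fun b => fitRank b == r)).flatMap truthySub := by
  induction l generalizing d with
  | nil => simp
  | cons b l ih =>
    simp only [List.foldl_cons, List.filter_cons, ih]
    have hmatch : ∀ subs : List String,
        (match subGet b with
          | some sc => if sc ≠ "" then subs ++ [sc] else subs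
          | none => subs) = subs ++ truthySub b := by
      intro subs; unfold truthySub
      cases h : subGet b with
      | none => simp
      | some sc => by_cases hsc : sc = "" <;> simp [hsc]
    by_cases hr : fitRank b == r
    · have hr' : r = fitRank b := (beq_iff_eq.mp hr).symm
      rw [PySem.Dict.getD_modify, if_pos hr', hmatch, hr']
      simp [List.append_assoc]
    · simp only [hr, Bool.false_eq_true, if_false]
      rw [PySem.Dict.getD_modify]
      have : ¬ r = fitRank b := by
        intro h; exact absurd (by simp [h] : (fitRank b == r) = true) (by simpa using hr)
      rw [if_neg this]

-- A's counting loop is the counting loop over the flattened truthy subcategories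
lemma countsFold (l : List (List (String × String))) (d : PySem.Dict String Int) :
    l.foldl (fun d b =>
      match subGet b with
      | some sc => if sc ≠ "" then d.insert sc (d.getD sc 0 + 1) else d
      | none => d) d
    = (l.flatMap truthySub).foldl (fun d sc => d.insert sc (d.getD sc 0 + 1)) d := by
  induction l generalizing d with
  | nil => rfl
  | cons b l ih =>
    simp only [List.foldl_cons, List.flatMap_cons, List.foldl_append, ih]
    congr 1
    unfold truthySub
    cases h : subGet b with
    | none => rfl
    | some sc => by_cases hsc : sc = "" <;> simp [hsc]

-- A's linear scan of FIT_TIER_RANK for the rank is B's reverse-table lookup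
lemma bestFit_eq (t : Int) :
    (List.find? (fun kv => kv.2 == t) FIT_TIER_RANK.items).map Prod.fst = RANK_TO_TIER.get? t := by
  by_cases h1 : t = 1
  · subst h1; decide
  by_cases h2 : t = 2
  · subst h2; decide
  by_cases h3 : t = 3
  · subst h3; decide
  have e1 : ((1:Int) == t) = false := by simp [Ne.symm h1]
  have e2 : ((2:Int) == t) = false := by simp [Ne.symm h2]
  have e3 : ((3:Int) == t) = false := by simp [Ne.symm h3]
  simp [FIT_TIER_RANK, RANK_TO_TIER, List.find?, PySem.Dict.get?, e1, e2, e3]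

-- ===== VERDICT (by name: the statement is the Claim_ definition above) =====
theorem pick_primary_spec : Claim_equal_pick_primary := by
  intro bs hdom hpre
  unfold Spec_pick_primary pick_primary pick_primary_alt
  by_cases hbs : bs = []
  · simp [hbs]
  simp only [if_neg hbs]
  have hkeys : (bs.foldl (fun d b =>
      d.modify (fitRank b) [] (fun subs =>
        match subGet b with
        | some sc => if sc ≠ "" then subs ++ [sc] else subs
        | none => subs)) PySem.Dict.empty).keys = PySem.Set.ofList (bs.map fitRank) := by
    rw [PySem.Dict.keys_foldl_modify_key bs fitRank []
      (fun _ b subs =>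
        match subGet b with
        | some sc => if sc ≠ "" then subs ++ [sc] else subs
        | none => subs) PySem.Dict.empty]
    rfl
  have hmapne : bs.map fitRank ≠ [] := by simp [hbs]
  rw [hkeys, min_ofList _ hmapne, countsFold, getD_groupFold, bestFit_eq]
  simp [PySem.Dict.getD_empty]
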